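-- pv_equiv track=rewrite | github.com/Bialek328/advent_of_code_2024 | solutions/day_2.py | check_descending
-- ===== SOURCE A (Python) =====
-- def check_descending(input: list) -> bool:
--     res = False
--     for i in range(len(input)):
--         if i + 1 >= len(input):
--             break
--         if input[i] > input[i + 1]:
--             res = True
--         else:
--             return False
--     return res
-- ===== SOURCE B (Python) =====
-- def check_descending(input: list) -> bool:
--     s = sorted(input, reverse=True)
--     return len(input) >= 2 and input == s and all(x != y for x, y in zip(s, s[1:]))
-- ===== Notes on version B (the rewrite author's own statement) =====
-- stated objective: alternative
-- what changed: B decides 'strictly descending' by comparing the list with its reverse-sorted copy and checking no adjacent duplicates via zip, instead of A's index loop over adjacent pairs with an early-return accumulator.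
import Mathlib
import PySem

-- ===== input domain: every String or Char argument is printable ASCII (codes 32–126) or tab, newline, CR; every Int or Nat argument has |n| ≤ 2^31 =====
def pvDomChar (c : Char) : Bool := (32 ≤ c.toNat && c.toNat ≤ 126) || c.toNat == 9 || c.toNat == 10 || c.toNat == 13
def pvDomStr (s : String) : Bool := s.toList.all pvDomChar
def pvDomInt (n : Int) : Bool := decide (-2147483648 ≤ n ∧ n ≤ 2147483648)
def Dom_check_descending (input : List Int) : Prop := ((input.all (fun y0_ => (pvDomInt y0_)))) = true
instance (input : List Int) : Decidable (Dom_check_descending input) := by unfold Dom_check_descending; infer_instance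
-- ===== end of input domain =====

-- B decides "strictly descending" by comparing the list with its reverse-sorted copy and checking no adjacent duplicates, instead of A's index loop with an early-return accumulator (objective: alternative).

-- ===== PORT A =====
def check_descending_loop (input : List Int) (i : Nat) (res : Bool) : Bool :=
  if i < input.length then
    if i + 1 ≥ input.length then res
    else if PySem.List.pyGetD input (i : Int) 0 > PySem.List.pyGetD input ((i : Int) + 1) 0 then
      check_descending_loop input (i + 1) true
    else false
  else res
termination_by input.length - i

def check_descending (input : List Int) : Bool := check_descending_loop input 0 false

-- ===== PORT B =====
def check_descending_alt (input : List Int) : Bool :=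
  let s := PySem.List.sorted input (fun x => x) true
  decide (2 ≤ input.length) && (input == s) &&
    (s.zip (PySem.List.slice s (some 1) none)).all (fun p => p.1 != p.2)

-- ===== PRECONDITION & SPEC =====
def Spec_check_descending (input : List Int) (out : Bool) : Prop := out = check_descending_alt input
instance (input : List Int) (out : Bool) : Decidable (Spec_check_descending input out) := by unfold Spec_check_descending; infer_instance

-- ===== CLAIM (what is proved, stated in full; the proofs are below) =====
def Claim_equal_check_descending : Prop := ∀ (input : List Int), Dom_check_descending input → Spec_check_descending input (check_descending input)

-- ===== LEMMAS AND PROOFS =====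

lemma isChain_and {R S : Int → Int → Prop} (l : List Int) (h1 : l.IsChain R) (h2 : l.IsChain S) :
    l.IsChain (fun a b => R a b ∧ S a b) := by
  induction l with
  | nil => exact .nil
  | cons a t ih =>
    cases t with
    | nil => exact .singleton _
    | cons b u =>
      rw [List.isChain_cons_cons] at h1 h2 ⊢
      exact ⟨⟨h1.1, h2.1⟩, ih h1.2 h2.2⟩

-- the list is its own reverse-sorted copy and adjacent-distinct iff it is strictly descending
lemma key_iff (input : List Int) :
    (input = PySem.List.sorted input (fun x => x) true ∧ input.IsChain (· ≠ ·)) ↔ input.IsChain (· > ·) := by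
  constructor
  · rintro ⟨heq, hne⟩
    have hp : input.Pairwise (fun a b : Int => b ≤ a) := by
      rw [heq]
      exact PySem.List.sorted_pairwise_rev input (fun x => x)
    have := isChain_and input hp.isChain hne
    exact this.imp fun a b h => lt_of_le_of_ne h.1 (Ne.symm h.2)
  · intro h
    have hp : input.Pairwise (fun a b : Int => a > b) := List.isChain_iff_pairwise.mp h
    exact ⟨(PySem.List.sorted_rev_eq_self_of_pairwise input (fun x => x)
              (hp.imp fun hab => le_of_lt hab)).symm,
           h.imp fun a b hab => ne_of_gt hab⟩

lemma zip_all_ne (s : List Int) :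
    ((s.zip (s.drop 1)).all (fun p => p.1 != p.2)) = decide (s.IsChain (· ≠ ·)) := by
  induction s with
  | nil => simp
  | cons a t ih =>
    cases t with
    | nil => simp
    | cons b u =>
      simp only [List.drop_one, List.tail_cons, List.zip_cons_cons, List.all_cons] at ih ⊢
      rw [ih]
      by_cases hab : a = b <;> simp [List.isChain_cons_cons, hab]

lemma b_char (input : List Int) :
    check_descending_alt input = (decide (2 ≤ input.length) && decide (input.IsChain (· > ·))) := by
  simp only [check_descending_alt]
  rw [PySem.List.slice_from _ (by norm_num : (0:Int) ≤ 1)]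
  simp only [Int.toNat_one]
  rw [zip_all_ne]
  by_cases heq : input = PySem.List.sorted input (fun x => x) true
  · rw [← heq]
    by_cases hc : input.IsChain (· > ·)
    · have hne := ((key_iff input).mpr hc).2
      simp [hc, hne]
    · have hne : ¬ input.IsChain (· ≠ ·) := fun hne => hc ((key_iff input).mp ⟨heq, hne⟩)
      simp [hc, hne]
  · have hb : (input == PySem.List.sorted input (fun x => x) true) = false := by
      simp [heq]
    have hc : ¬ input.IsChain (· > ·) := fun hc => heq ((key_iff input).mpr hc).1
    simp [hb, hc]

-- A's loop, while at least two elements remain from index i, decides the strict descending chain on the suffix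
lemma loop_spec (input : List Int) : ∀ n i res, input.length - i = n → i + 1 < input.length →
    check_descending_loop input i res = decide ((input.drop i).IsChain (· > ·)) := by
  intro n
  induction n using Nat.strong_induction_on with
  | _ n ih =>
    intro i res hn hlt
    have hi : i < input.length := by omega
    rw [check_descending_loop, if_pos hi, if_neg (by omega)]
    have hg1 : PySem.List.pyGetD input (i : Int) 0 = input[i] := by
      rw [PySem.List.pyGetD_natCast, List.getD_eq_getElem _ _ hi]
    have hg2 : PySem.List.pyGetD input ((i : Int) + 1) 0 = input[i+1] := by
      rw [show ((i : Int) + 1) = ((i+1 : Nat) : Int) by push_cast; ring,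
          PySem.List.pyGetD_natCast, List.getD_eq_getElem _ _ hlt]
    have hsplit : (input.drop i).IsChain (· > ·) ↔
        (input[i] > input[i+1] ∧ (input.drop (i+1)).IsChain (· > ·)) := by
      rw [List.drop_eq_getElem_cons hi,
          show input.drop (i+1) = input[i+1] :: input.drop (i+2) from
            List.drop_eq_getElem_cons hlt,
          List.isChain_cons_cons]
    rw [hg1, hg2]
    by_cases hcmp : input[i] > input[i+1]
    · rw [if_pos hcmp]
      by_cases hend : i + 1 + 1 < input.length
      · rw [ih (input.length - (i+1)) (by omega) (i+1) true rfl hend, decide_eq_decide,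
            hsplit]
        simp [hcmp]
      · have hd1 : input.drop (i+1) = [input[i+1]] := by
          rw [List.drop_eq_getElem_cons hlt, List.drop_eq_nil_of_le (by omega : input.length ≤ i + 2)]
        rw [check_descending_loop, if_pos (by omega : i + 1 < input.length),
            if_pos (by omega : i + 1 + 1 ≥ input.length)]
        simp [hsplit, hd1, hcmp]
    · rw [if_neg hcmp]
      simp [hsplit, hcmp]

lemma a_char (input : List Int) :
    check_descending input = (decide (2 ≤ input.length) && decide (input.IsChain (· > ·))) := by
  by_cases h2 : 2 ≤ input.length
  · unfold check_descending
    rw [loop_spec input input.length 0 false (by omega) (by omega)]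
    simp [h2]
  · cases input with
    | nil =>
      unfold check_descending
      rw [check_descending_loop]
      simp
    | cons a t =>
      cases t with
      | nil =>
        unfold check_descending
        rw [check_descending_loop]
        simp
      | cons b u => exact absurd (by simp) h2

-- ===== VERDICT (by name: the statement is the Claim_ definition above) =====
theorem check_descending_spec : Claim_equal_check_descending := by
  intro input _
  unfold Spec_check_descending
  rw [a_char, b_char]
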